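-- pv_equiv track=rewrite | github.com/NuttakitDW/rust-solver-poc | visualize.py | bucket_to_hand
-- ===== SOURCE A (Python) =====
-- INTERNAL_TO_DISPLAY = {12: 'A', 11: 'K', 10: 'Q', 9: 'J', 8: 'T', 7: '9', 6: '8', 5: '7', 4: '6', 3: '5', 2: '4', 1: '3', 0: '2'}
--
-- def bucket_to_hand(bucket: int) -> tuple[str, str]:
--     """Convert bucket index to hand name and type (pair/suited/offsuit)."""
--     if bucket <= 12:
--         # Pairs: 0=22, 12=AA
--         rank = INTERNAL_TO_DISPLAY[bucket]
--         return f"{rank}{rank}", "pair"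
--     elif bucket <= 90:
--         # Suited: 13-90
--         # Formula: 13 + r1 * (r1 - 1) / 2 + r2 where r1 > r2
--         idx = bucket - 13
--         # Find r1, r2 such that r1*(r1-1)/2 + r2 = idx
--         r1 = 1
--         while (r1 + 1) * r1 // 2 <= idx:
--             r1 += 1
--         r2 = idx - r1 * (r1 - 1) // 2
--         high = INTERNAL_TO_DISPLAY[r1]
--         low = INTERNAL_TO_DISPLAY[r2]
--         return f"{high}{low}s", "suited"
--     else:
--         # Offsuit: 91-168
--         idx = bucket - 91
--         r1 = 1
--         while (r1 + 1) * r1 // 2 <= idx: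
--             r1 += 1
--         r2 = idx - r1 * (r1 - 1) // 2
--         high = INTERNAL_TO_DISPLAY[r1]
--         low = INTERNAL_TO_DISPLAY[r2]
--         return f"{high}{low}o", "offsuit"
-- ===== SOURCE B (Python) =====
-- RANKS = "23456789TJQKA"
--
-- _TABLE = [(r * 2, "pair") for r in RANKS]
-- for _suffix, _type in (("s", "suited"), ("o", "offsuit")):
--     for _r1 in range(1, 13):
--         for _r2 in range(_r1):
--             _TABLE.append((RANKS[_r1] + RANKS[_r2] + _suffix, _type))
--
-- def bucket_to_hand(bucket: int) -> tuple[str, str]: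
--     """Convert bucket index to hand name and type (pair/suited/offsuit)."""
--     return _TABLE[bucket]
-- ===== Notes on version B (the rewrite author's own statement) =====
-- stated objective: simpler
-- what changed: B precomputes the full 169-entry (hand, type) table once from a rank string and replaces A's branch/dict/while-loop search with a single direct list index.
-- outside the precondition, e.g. on bucket_to_hand(-1): A raises KeyError, B returns ('AKo', 'offsuit'); on bucket_to_hand(169): A raises KeyError, B raises IndexError
import Mathlib
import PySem

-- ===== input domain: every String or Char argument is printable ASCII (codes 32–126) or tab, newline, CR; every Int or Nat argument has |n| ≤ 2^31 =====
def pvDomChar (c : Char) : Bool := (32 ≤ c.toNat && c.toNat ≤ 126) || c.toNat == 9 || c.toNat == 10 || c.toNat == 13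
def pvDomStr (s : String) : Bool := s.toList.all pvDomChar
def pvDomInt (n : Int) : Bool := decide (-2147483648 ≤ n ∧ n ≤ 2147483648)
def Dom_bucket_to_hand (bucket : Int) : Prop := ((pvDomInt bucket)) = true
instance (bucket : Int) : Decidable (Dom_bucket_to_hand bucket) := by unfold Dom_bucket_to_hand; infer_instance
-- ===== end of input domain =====

-- B replaces A's three-way branch with incremental while-loop searches by ONE precomputed
-- 169-entry table built rank-by-rank, indexed directly (objective: simpler).

-- ===== PORT A =====
-- INTERNAL_TO_DISPLAY = {12:'A', …, 0:'2'}
def internalToDisplay : PySem.Dict Int String :=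
  PySem.Dict.ofList [(12, "A"), (11, "K"), (10, "Q"), (9, "J"), (8, "T"), (7, "9"),
                     (6, "8"), (5, "7"), (4, "6"), (3, "5"), (2, "4"), (1, "3"), (0, "2")]

-- the 'while (r1 + 1) * r1 // 2 <= idx: r1 += 1' loop; fuel only makes it total
-- (inside Pre_ idx ≤ 77, so the loop takes at most 12 steps and fuel 200 is never exhausted)
def findR1A (fuel : Nat) (idx r1 : Int) : Int :=
  match fuel with
  | 0 => r1
  | fuel + 1 =>
    if PySem.Int.floordiv ((r1 + 1) * r1) 2 ≤ idx then findR1A fuel idx (r1 + 1) else r1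

def bucket_to_hand (bucket : Int) : String × String :=
  if bucket ≤ 12 then
    -- dict lookup raises KeyError on negative buckets: excluded by Pre_, default never read
    let rank := internalToDisplay.getD bucket ""
    (rank ++ rank, "pair")
  else if bucket ≤ 90 then
    let idx := bucket - 13
    let r1 := findR1A 200 idx 1
    let r2 := idx - PySem.Int.floordiv (r1 * (r1 - 1)) 2
    let high := internalToDisplay.getD r1 ""
    let low := internalToDisplay.getD r2 ""
    (high ++ low ++ "s", "suited")
  else
    -- dict lookup raises KeyError past the offsuit range: excluded by Pre_, default never read
    let idx := bucket - 91
    let r1 := findR1A 200 idx 1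
    let r2 := idx - PySem.Int.floordiv (r1 * (r1 - 1)) 2
    let high := internalToDisplay.getD r1 ""
    let low := internalToDisplay.getD r2 ""
    (high ++ low ++ "o", "offsuit")

-- ===== PORT B =====
-- RANKS = "23456789TJQKA"
def altRanks : List Char := "23456789TJQKA".toList

-- _TABLE: 13 pairs, then suited and offsuit combos in the same nested-loop order as Source B
def altTable : List (String × String) :=
  altRanks.map (fun r => (String.ofList [r, r], "pair"))
  ++ [("s", "suited"), ("o", "offsuit")].flatMap (fun p =>
       (PySem.List.pyRange 1 13 1).flatMap (fun r1 =>
         (PySem.List.pyRange 0 r1 1).map (fun r2 =>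
           (String.ofList [PySem.List.pyGetD altRanks r1 ' ', PySem.List.pyGetD altRanks r2 ' ']
              ++ p.1, p.2))))

def bucket_to_hand_alt (bucket : Int) : String × String :=
  -- _TABLE[bucket]; IndexError (out of range) is excluded by Pre_, default never read
  (PySem.List.pyGet? altTable bucket).getD ("", "")

-- ===== PRECONDITION & SPEC =====
-- the Python A raises KeyError on negative buckets and on buckets past the offsuit range (rank index leaves the dict)
def Pre_bucket_to_hand (bucket : Int) : Prop := 0 ≤ bucket ∧ bucket ≤ 168
instance (bucket : Int) : Decidable (Pre_bucket_to_hand bucket) := by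
  unfold Pre_bucket_to_hand; infer_instance

def pvWitness_bucket_to_hand : Int := 42

def Spec_bucket_to_hand (bucket : Int) (out : String × String) : Prop := out = bucket_to_hand_alt bucket
instance (bucket : Int) (out : String × String) : Decidable (Spec_bucket_to_hand bucket out) := by unfold Spec_bucket_to_hand; infer_instance

-- ===== CLAIM (what is proved, stated in full; the proofs are below) =====
def Claim_equal_bucket_to_hand : Prop := ∀ (bucket : Int), Dom_bucket_to_hand bucket → Pre_bucket_to_hand bucket → Spec_bucket_to_hand bucket (bucket_to_hand bucket)

-- ===== LEMMAS AND PROOFS =====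

set_option maxRecDepth 4096 in
theorem ports_agree_below_169 :
    ∀ n : Nat, n < 169 → bucket_to_hand (n : Int) = bucket_to_hand_alt (n : Int) := by
  decide

-- ===== VERDICT (by name: the statement is the Claim_ definition above) =====
theorem bucket_to_hand_spec : Claim_equal_bucket_to_hand := by
  intro bucket _ hpre
  unfold Spec_bucket_to_hand
  obtain ⟨h0, h1⟩ := hpre
  have hb : bucket = ((bucket.toNat : Nat) : Int) := (Int.toNat_of_nonneg h0).symm
  rw [hb]
  exact ports_agree_below_169 bucket.toNat (by omega)
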